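-- pv_equiv track=rewrite | github.com/a-gavriel/Python-Games | Clases/Clases-Ejecicios/Soluciones/E4a.py | todos_pares
-- ===== SOURCE A (Python) =====
-- def todos_pares(num):
-- 	if num == 0:
-- 		return True
-- 	else:
-- 		dig = num%10
-- 		if dig%2 == 1: # if num%2 == 1
-- 			return False
-- 		else:
-- 			return todos_pares(num//10)
-- ===== SOURCE B (Python) =====
-- def todos_pares(num):
--     # all digits even <=> every character of the decimal representation is an
--     # even digit; for a negative number the '-' sign fails the test, matching
--     # the original's False on negatives.
--     return all(c in "02468" for c in str(num))
-- ===== Notes on version B (the rewrite author's own statement) =====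
-- stated objective: idiomatic
-- what changed: Replaces the digit-by-digit tail recursion over %10 and //10 with a single idiomatic all() over the characters of str(num), where the '-' sign of a negative number fails the test exactly as A's floor-mod recursion does.
import Mathlib
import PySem

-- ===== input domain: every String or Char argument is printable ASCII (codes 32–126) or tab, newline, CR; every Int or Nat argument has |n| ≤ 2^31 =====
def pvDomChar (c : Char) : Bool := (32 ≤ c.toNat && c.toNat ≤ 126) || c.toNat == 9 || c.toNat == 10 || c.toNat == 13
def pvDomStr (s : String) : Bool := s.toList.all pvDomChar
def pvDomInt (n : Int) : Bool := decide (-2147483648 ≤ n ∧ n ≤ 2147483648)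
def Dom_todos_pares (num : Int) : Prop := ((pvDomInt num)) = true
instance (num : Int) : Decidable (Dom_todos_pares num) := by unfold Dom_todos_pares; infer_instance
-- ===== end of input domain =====

-- B replaces A's %10//10 tail recursion by an idiomatic all() over the characters of str(num); same values everywhere.

-- ===== PORT A =====
-- termination fact for A's recursion (cited by decreasing_by below)
theorem pvA_floordiv_lt (num : Int) (h0 : ¬ num = 0)
    (h1 : ¬ PySem.Int.mod (PySem.Int.mod num 10) 2 = 1) :
    (PySem.Int.floordiv num 10).natAbs < num.natAbs := by
  have hq := PySem.Int.floordiv_mul_add_mod num 10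
  have hr0 : (0:Int) ≤ PySem.Int.mod num 10 := PySem.Int.mod_nonneg num (by norm_num)
  have hr1 : PySem.Int.mod num 10 < 10 := PySem.Int.mod_lt num (by norm_num)
  have hne : num ≠ -1 := by
    intro h; subst h; exact h1 (by decide)
  omega

def todos_pares (num : Int) : Bool :=
  if h0 : num = 0 then
    true
  else
    let dig := PySem.Int.mod num 10
    if h1 : PySem.Int.mod dig 2 = 1 then
      false
    else
      todos_pares (PySem.Int.floordiv num 10)
termination_by num.natAbs
decreasing_by exact pvA_floordiv_lt num h0 h1

-- ===== PORT B =====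
-- `c in "02468"` for the single characters of str(num) is exactly membership among these five chars
def todos_pares_alt (num : Int) : Bool :=
  (PySem.Int.toChars num).all (fun c => ['0', '2', '4', '6', '8'].contains c)

-- ===== PRECONDITION & SPEC =====
def Spec_todos_pares (num : Int) (out : Bool) : Prop := out = todos_pares_alt num
instance (num : Int) (out : Bool) : Decidable (Spec_todos_pares num out) := by unfold Spec_todos_pares; infer_instance

-- ===== CLAIM (what is proved, stated in full; the proofs are below) =====
def Claim_equal_todos_pares : Prop := ∀ (num : Int), Dom_todos_pares num → Spec_todos_pares num (todos_pares num)

-- ===== LEMMAS AND PROOFS =====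

-- the digit-membership predicate of B's port, by name
def pvP (c : Char) : Bool := ['0', '2', '4', '6', '8'].contains c

theorem pvAlt_eq (num : Int) : todos_pares_alt num = (PySem.Int.toChars num).all pvP := rfl

-- "all decimal digits of the natural number n are even", digit recursion
def pvNatEven (n : Nat) : Bool :=
  (n % 10 % 2 == 0) && (if n / 10 = 0 then true else pvNatEven (n / 10))
termination_by n
decreasing_by omega

theorem pvP_digitChar (d : Nat) (hd : d < 10) : pvP (Nat.digitChar d) = (d % 2 == 0) := by
  interval_cases d <;> decide

theorem pvCore (f : Nat) : ∀ (n : Nat) (acc : List Char), n < f →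
    (Nat.toDigitsCore 10 f n acc).all pvP = (pvNatEven n && acc.all pvP) := by
  induction f with
  | zero => intro n acc h; omega
  | succ f ih =>
    intro n acc h
    rw [Nat.toDigitsCore, pvNatEven]
    have hm : n % 10 < 10 := by omega
    by_cases h0 : n / 10 = 0
    · simp only [h0, if_pos]
      have hn : n % 10 = n := by omega
      have hlt : n < 10 := by omega
      simp [List.all_cons, hn, pvP_digitChar n hlt]
    · simp only [h0, if_false]
      rw [ih (n / 10) _ (by omega)]
      simp [List.all_cons, pvP_digitChar _ hm, Bool.and_assoc, Bool.and_comm]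

theorem pvB_nonneg (n : Nat) : (Nat.toDigits 10 n).all pvP = pvNatEven n := by
  rw [Nat.toDigits, pvCore (n + 1) n [] (by omega)]
  simp

-- A on negatives is always False: the recursion reaches a positive floor-mod odd digit
theorem pvA_neg : ∀ (k : Nat) (num : Int), num.natAbs ≤ k → num < 0 → todos_pares num = false := by
  intro k
  induction k with
  | zero => intro num hk hneg; omega
  | succ k ih =>
    intro num hk hneg
    have h0 : ¬ num = 0 := by omega
    rw [todos_pares, dif_neg h0]
    dsimp only
    split_ifs with h1
    · rfl
    · have hlt := pvA_floordiv_lt num h0 h1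
      have hq := PySem.Int.floordiv_mul_add_mod num 10
      have hr0 : (0:Int) ≤ PySem.Int.mod num 10 := PySem.Int.mod_nonneg num (by norm_num)
      have hr1 : PySem.Int.mod num 10 < 10 := PySem.Int.mod_lt num (by norm_num)
      exact ih (PySem.Int.floordiv num 10) (by omega) (by omega)

-- A on positives computes pvNatEven of the magnitude
theorem pvA_pos : ∀ (k : Nat) (num : Int), num.toNat ≤ k → 0 < num →
    todos_pares num = pvNatEven num.toNat := by
  intro k
  induction k with
  | zero => intro num hk hpos; omega
  | succ k ih =>
    intro num hk hpos
    have h0 : ¬ num = 0 := by omega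
    have hmod : PySem.Int.mod num 10 = num % 10 :=
      PySem.Int.mod_eq_emod_of_pos (by norm_num)
    have hmod2 : PySem.Int.mod (num % 10) 2 = num % 10 % 2 :=
      PySem.Int.mod_eq_emod_of_pos (by norm_num)
    have hdiv : PySem.Int.floordiv num 10 = num / 10 :=
      PySem.Int.floordiv_eq_ediv_of_pos (by norm_num)
    rw [todos_pares, dif_neg h0, pvNatEven]
    dsimp only
    rw [hmod, hmod2]
    by_cases h1 : num % 10 % 2 = 1
    · rw [dif_pos h1]
      have hb : (num.toNat % 10 % 2 == 0) = false := by
        simp only [beq_eq_false_iff_ne]; omega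
      rw [hb, Bool.false_and]
    · rw [dif_neg h1, hdiv]
      by_cases hz : num / 10 = 0
      · rw [hz]
        have hA0 : todos_pares 0 = true := by rw [todos_pares]; exact dif_pos rfl
        rw [hA0]
        have hzN : num.toNat / 10 = 0 := by omega
        have hev : num.toNat % 10 % 2 = 0 := by omega
        simp [hzN, hev]
      · have hdpos : 0 < num / 10 := by omega
        rw [ih (num / 10) (by omega) hdpos]
        have ht : (num / 10).toNat = num.toNat / 10 := by omega
        rw [ht]
        have hzN : ¬ num.toNat / 10 = 0 := by omega
        have hev : num.toNat % 10 % 2 = 0 := by omega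
        simp [hzN, hev]

-- ===== VERDICT (by name: the statement is the Claim_ definition above) =====
theorem todos_pares_spec : Claim_equal_todos_pares := by
  intro num _
  unfold Spec_todos_pares
  rw [pvAlt_eq, PySem.Int.toChars]
  rcases lt_trichotomy num 0 with hneg | hzero | hpos
  · rw [if_pos hneg, pvA_neg num.natAbs num le_rfl hneg]
    simp [pvP]
  · subst hzero
    have hA0 : todos_pares 0 = true := by rw [todos_pares]; exact dif_pos rfl
    rw [hA0]
    decide
  · rw [if_neg (by omega), pvB_nonneg, pvA_pos num.toNat num le_rfl hpos]
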